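-- pv_equiv track=rewrite | github.com/RuoZhouH/drl_bases | test8.py | findMinSub
-- ===== SOURCE A (Python) =====
-- def findMinSub(ls):
--     subLs = [ls[0]]
--     startPoint = ls[0]
--     for i in range(len(ls)):
--         subTempLs = ls[i:]
--         minPoint = min(subTempLs)
--         if minPoint > startPoint:
--             subLs.append(minPoint)
--             startPoint = minPoint
--     return subLs
-- ===== SOURCE B (Python) =====
-- def findMinSub(ls):
--     # one backward pass computes all suffix minima, then one forward scan
--     rev = []                      # suffix minima of ls, in reverse order
--     m = ls[-1]
--     for x in reversed(ls):
--         if x < m: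
--             m = x
--         rev.append(m)
--     out = [ls[0]]
--     cur = ls[0]
--     for v in reversed(rev):
--         if v > cur:
--             out.append(v)
--             cur = v
--     return out
-- ===== Notes on version B (the rewrite author's own statement) =====
-- stated objective: faster
-- what changed: replaces the per-index min() over each suffix (quadratic) by a single backward pass that precomputes all suffix minima, followed by one forward scan
import Mathlib
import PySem

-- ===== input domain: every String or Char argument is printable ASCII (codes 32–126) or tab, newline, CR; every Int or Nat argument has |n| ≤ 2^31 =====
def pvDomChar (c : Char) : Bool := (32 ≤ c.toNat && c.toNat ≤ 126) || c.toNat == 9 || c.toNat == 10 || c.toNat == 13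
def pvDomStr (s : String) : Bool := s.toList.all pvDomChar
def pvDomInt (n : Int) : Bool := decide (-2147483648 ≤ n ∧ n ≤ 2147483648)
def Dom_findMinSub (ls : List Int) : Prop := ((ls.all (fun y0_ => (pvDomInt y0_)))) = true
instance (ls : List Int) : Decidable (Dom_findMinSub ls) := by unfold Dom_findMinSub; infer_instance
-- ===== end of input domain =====

-- B replaces A's per-index min() over every suffix by one backward pass precomputing all
-- suffix minima plus one forward scan (objective: faster, O(n^2) → O(n)).

-- ===== PORT A =====
-- A: subLs = [ls[0]]; for i in range(len(ls)): minPoint = min(ls[i:]); append if it exceeds startPoint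
def findMinSub (ls : List Int) : List Int :=
  match PySem.List.pyGet? ls 0 with
  | none => []   -- Python: IndexError on ls[0]; excluded by Pre_
  | some h0 =>
    ((PySem.List.pyRange 0 (ls.length : Int) 1).foldl
      (fun (st : List Int × Int) i =>
        let subTempLs := PySem.List.slice ls (some i) none
        match PySem.List.min? subTempLs (fun y => y) with
        | none => st   -- Python: ValueError on min([]); unreachable since i < len(ls)
        | some minPoint =>
          if minPoint > st.2 then (st.1 ++ [minPoint], minPoint) else st)
      ([h0], h0)).1

-- ===== PORT B =====
-- B: backward pass builds the suffix minima (in reverse), then one forward scan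
def findMinSub_alt (ls : List Int) : List Int :=
  match PySem.List.pyGet? ls (-1), PySem.List.pyGet? ls 0 with
  | some last, some h0 =>
    let rev := (ls.reverse.foldl
      (fun (st : List Int × Int) x =>
        let m := if x < st.2 then x else st.2
        (st.1 ++ [m], m)) ([], last)).1
    (rev.reverse.foldl
      (fun (st : List Int × Int) v =>
        if v > st.2 then (st.1 ++ [v], v) else st) ([h0], h0)).1
  | _, _ => []   -- Python: IndexError on ls[-1]/ls[0]; excluded by Pre_

-- ===== PRECONDITION & SPEC =====
-- A raises (IndexError on ls[0], then ValueError on min([])) exactly on the empty list; B raises there too.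
def Pre_findMinSub (ls : List Int) : Prop := ls ≠ []
instance (ls : List Int) : Decidable (Pre_findMinSub ls) := by unfold Pre_findMinSub; infer_instance
def pvWitness_findMinSub : List Int := [3, 1, 4, 1, 5]

def Spec_findMinSub (ls : List Int) (out : List Int) : Prop := out = findMinSub_alt ls
instance (ls : List Int) (out : List Int) : Decidable (Spec_findMinSub ls out) := by unfold Spec_findMinSub; infer_instance

-- ===== CLAIM (what is proved, stated in full; the proofs are below) =====
def Claim_equal_findMinSub : Prop := ∀ (ls : List Int), Dom_findMinSub ls → Pre_findMinSub ls → Spec_findMinSub ls (findMinSub ls)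

-- ===== LEMMAS AND PROOFS =====

-- min of a nonempty list, as Python's running-min loop computes it
def minOf : List Int → Int
  | [] => 0          -- junk value, never used on []
  | x :: t => t.foldl min x

-- the list [min(ls[0:]), min(ls[1:]), …, min(ls[n-1:])]
def sufList : List Int → List Int
  | [] => []
  | x :: t => minOf (x :: t) :: sufList t

theorem foldl_min_init (t : List Int) (a b : Int) :
    t.foldl min (min a b) = min a (t.foldl min b) := by
  induction t generalizing b with
  | nil => rfl
  | cons y t ih =>
    simp only [List.foldl_cons, min_assoc, ih]

theorem minOf_cons (x : Int) (t : List Int) (h : t ≠ []) :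
    minOf (x :: t) = min x (minOf t) := by
  cases t with
  | nil => exact absurd rfl h
  | cons y u => simp [minOf, foldl_min_init]

theorem min?_eq_minOf (t : List Int) (h : t ≠ []) :
    PySem.List.min? t (fun y => y) = some (minOf t) := by
  cases t with
  | nil => exact absurd rfl h
  | cons x u => rw [PySem.List.min?_id_cons]; rfl

theorem map_range_minOf (ls : List Int) :
    (List.range ls.length).map (fun k => minOf (ls.drop k)) = sufList ls := by
  induction ls with
  | nil => rfl
  | cons x t ih =>
    rw [List.length_cons, List.range_succ_eq_map, List.map_cons, List.map_map]
    refine congrArg₂ _ rfl ?_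
    rw [← ih]
    rfl

-- the shared forward-scan step
def scanStep (st : List Int × Int) (v : Int) : List Int × Int :=
  if v > st.2 then (st.1 ++ [v], v) else st

-- B's backward pass builds exactly (sufList ls).reverse, carrying minOf ls
theorem revfold_eq (ls : List Int) (h : ls ≠ []) (acc : List Int) :
    ls.reverse.foldl
      (fun (st : List Int × Int) x =>
        let m := if x < st.2 then x else st.2
        (st.1 ++ [m], m)) (acc, ls.getLast h)
    = (acc ++ (sufList ls).reverse, minOf ls) := by
  induction ls generalizing acc with
  | nil => exact absurd rfl h
  | cons x t ih =>
    cases t with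
    | nil => simp [sufList, minOf]
    | cons y u =>
      have ht : (y :: u) ≠ [] := by simp
      rw [List.reverse_cons, List.foldl_append,
          List.getLast_cons ht, ih ht acc]
      have hx : (if x < minOf (y :: u) then x else minOf (y :: u)) = minOf (x :: y :: u) := by
        rw [minOf_cons x _ ht, min_def]
        by_cases hlt : x < minOf (y :: u)
        · simp [hlt, le_of_lt hlt]
        · have : ¬ x ≤ minOf (y :: u) ∨ x = minOf (y :: u) := by omega
          rcases this with h' | h' <;> simp [hlt, h']
      simp only [List.foldl_cons, List.foldl_nil, hx]
      rw [show sufList (x :: y :: u) = minOf (x :: y :: u) :: sufList (y :: u) from rfl]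
      simp

-- A's index loop is the forward scan over sufList
theorem afold_eq (ls : List Int) (init : List Int × Int) :
    (PySem.List.pyRange 0 (ls.length : Int) 1).foldl
      (fun (st : List Int × Int) i =>
        let subTempLs := PySem.List.slice ls (some i) none
        match PySem.List.min? subTempLs (fun y => y) with
        | none => st
        | some minPoint =>
          if minPoint > st.2 then (st.1 ++ [minPoint], minPoint) else st) init
    = (sufList ls).foldl scanStep init := by
  have hcongr :
      (PySem.List.pyRange 0 (ls.length : Int) 1).foldl
        (fun (st : List Int × Int) i =>
          let subTempLs := PySem.List.slice ls (some i) none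
          match PySem.List.min? subTempLs (fun y => y) with
          | none => st
          | some minPoint =>
            if minPoint > st.2 then (st.1 ++ [minPoint], minPoint) else st) init
      = (PySem.List.pyRange 0 (ls.length : Int) 1).foldl
          (fun st i => scanStep st (minOf (ls.drop i.toNat))) init := by
    apply PySem.List.foldl_congr_mem
    intro acc i hi
    rw [PySem.List.mem_pyRange_one] at hi
    have h0 : (0:Int) ≤ i := hi.1
    have hslice : PySem.List.slice ls (some i) none = ls.drop i.toNat := by
      simp [pysem, h0]
    have hne : ls.drop i.toNat ≠ [] := by
      have : i.toNat < ls.length := by omega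
      simp [List.drop_eq_nil_iff]; omega
    simp only [hslice, min?_eq_minOf _ hne, scanStep]
  rw [hcongr, PySem.List.pyRange_one, List.foldl_map, ← map_range_minOf, List.foldl_map]
  simp only [Int.sub_zero, Int.toNat_natCast]
  apply PySem.List.foldl_congr_mem
  intro acc k hk
  simp

theorem findMinSub_eq_alt (ls : List Int) (h : ls ≠ []) :
    findMinSub ls = findMinSub_alt ls := by
  cases ls with
  | nil => exact absurd rfl h
  | cons x t =>
    have hne : (x :: t) ≠ [] := by simp
    have hlast : PySem.List.pyGet? (x :: t) (-1) = some ((x :: t).getLast hne) := by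
      rw [PySem.List.pyGet?_neg_one, List.getLast?_eq_getLast_of_ne_nil hne]
    unfold findMinSub findMinSub_alt
    rw [PySem.List.pyGet?_zero_cons, hlast]
    simp only [revfold_eq (x :: t) hne [], List.nil_append, List.reverse_reverse,
      afold_eq (x :: t) ([x], x)]
    rfl

-- ===== VERDICT (by name: the statement is the Claim_ definition above) =====
theorem findMinSub_spec : Claim_equal_findMinSub := by
  intro ls _ hpre
  unfold Spec_findMinSub
  exact findMinSub_eq_alt ls hpre
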